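-- pv_equiv track=rewrite | github.com/Teves0105/Coffee-Machine | Lab06/Lab6_P5.py | analyze_words
-- ===== SOURCE A (Python) =====
-- def analyze_words(words):
--     result = []
--
--     for index, word in enumerate(words):
--         # Create a list to count the frequency of each character
--         new_set = list(set(word))
--         new_set.sort()
--         char_count = [word.count(char) for char in new_set]
--         # Sort the characters alphabetically and format the output
--         formatted_counts = ", ".join(f"{new_set[i]}: {char_count[i]}" for i in range(len(new_set)))
--         # Construct the final string for this word
--         result.append(f"{index} - {formatted_counts}")
--
--
--     return result
-- ===== SOURCE B (Python) =====
-- def analyze_words(words):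
--     out = []
--     for index, word in enumerate(words):
--         chars = sorted(word)
--         parts = []
--         i = 0
--         n = len(chars)
--         while i < n:
--             j = i + 1
--             while j < n and chars[j] == chars[i]:
--                 j += 1
--             parts.append(f"{chars[i]}: {j - i}")
--             i = j
--         out.append(f"{index} - " + ", ".join(parts))
--     return out
-- ===== Notes on version B (the rewrite author's own statement) =====
-- stated objective: faster
-- what changed: B sorts each word's characters once and emits run lengths in a single left-to-right scan, instead of A's building a sorted set of distinct characters and re-scanning the whole word with word.count for each of them.
import Mathlib
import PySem

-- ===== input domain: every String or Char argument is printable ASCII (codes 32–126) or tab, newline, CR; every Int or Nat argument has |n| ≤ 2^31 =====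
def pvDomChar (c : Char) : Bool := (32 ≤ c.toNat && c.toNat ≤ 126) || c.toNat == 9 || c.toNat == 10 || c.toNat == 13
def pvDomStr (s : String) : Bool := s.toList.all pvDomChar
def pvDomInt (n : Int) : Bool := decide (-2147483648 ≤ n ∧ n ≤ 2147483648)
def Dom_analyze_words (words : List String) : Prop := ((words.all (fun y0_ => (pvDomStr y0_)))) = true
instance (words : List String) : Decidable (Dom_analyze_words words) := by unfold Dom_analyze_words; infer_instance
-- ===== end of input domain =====

-- B replaces A's sorted-distinct-set-then-word.count scanning by one sort-then-run-length pass (alternative algorithm, same return value).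

-- ===== PORT A =====
-- Literal port of A: for each (index, word), new_set = sorted list of the distinct characters,
-- char_count[i] = word.count(new_set[i]) (PySem.Chars.count with a one-char needle = str.count),
-- then ", ".join over range(len(new_set)) and append f"{index} - {formatted_counts}".
def analyze_words (words : List String) : List String :=
  (PySem.List.enumerate words 0).foldl
    (fun result p =>
      let word := p.2
      let new_set := PySem.List.sorted (PySem.Set.ofList word.toList) (fun c => c) false
      let char_count := new_set.map (fun c => (PySem.Chars.count word.toList [c] : Int))
      let formatted :=
        PySem.Chars.join (", ".toList)
          ((PySem.List.pyRange 0 (PySem.List.len new_set) 1).map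
            (fun i => [PySem.List.pyGetD new_set i ' '] ++ (": ".toList) ++
                      PySem.Int.toChars (PySem.List.pyGetD char_count i 0)))
      result ++ [String.ofList (PySem.Int.toChars p.1 ++ (" - ".toList) ++ formatted)])
    []

-- ===== PORT B =====
-- B's inner while-scan over the sorted characters: each outer step starts a run at the current
-- character, the inner 'while chars[j] == chars[i]' advance is exactly takeWhile, and 'i = j'
-- resumes at the remainder, exactly dropWhile (run length j - i = 1 + takeWhile length).
def pvRuns (cs : List Char) : List (Char × Nat) :=
  match cs with
  | [] => []
  | c :: t =>
      (c, 1 + (t.takeWhile (fun x => x == c)).length) :: pvRuns (t.dropWhile (fun x => x == c))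
termination_by cs.length
decreasing_by
  simp only [List.length_cons]
  exact Nat.lt_succ_of_le (List.length_dropWhile_le _ _)

def analyze_words_alt (words : List String) : List String :=
  (PySem.List.enumerate words 0).map (fun p =>
    let parts := (pvRuns (PySem.List.sorted p.2.toList (fun c => c) false)).map
        (fun q => [q.1] ++ (": ".toList) ++ PySem.Int.toChars (q.2 : Int))
    String.ofList (PySem.Int.toChars p.1 ++ (" - ".toList) ++ PySem.Chars.join (", ".toList) parts))

-- ===== PRECONDITION & SPEC =====
def Spec_analyze_words (words : List String) (out : List String) : Prop := out = analyze_words_alt words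
instance (words : List String) (out : List String) : Decidable (Spec_analyze_words words out) := by unfold Spec_analyze_words; infer_instance

-- ===== CLAIM (what is proved, stated in full; the proofs are below) =====
def Claim_equal_analyze_words : Prop := ∀ (words : List String), Dom_analyze_words words → Spec_analyze_words words (analyze_words words)

-- ===== LEMMAS AND PROOFS =====

-- str.count with a one-character needle is List.count (unfolds PySem.Chars.count.go, which has no singleton lemma).
lemma pv_count_go_singleton (c : Char) :
    ∀ (cs : List Char) (fuel acc : Nat), cs.length ≤ fuel →
      PySem.Chars.count.go [c] fuel cs acc = acc + cs.count c := by
  intro cs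
  induction cs with
  | nil =>
      intro fuel acc _
      cases fuel <;> simp [PySem.Chars.count.go]
  | cons x t ih =>
      intro fuel acc hf
      cases fuel with
      | zero => simp at hf
      | succ f =>
          rw [PySem.Chars.count.go]
          by_cases hx : x = c
          · subst hx
            simp only [List.isPrefixOf, BEq.rfl, Bool.and_eq_true, and_true, if_pos]
            simp only [List.length_singleton, List.drop_one, List.tail_cons]
            rw [ih f (acc + 1) (by simpa using Nat.le_of_succ_le_succ hf)]
            simp
            omega
          · have hpre : ([c].isPrefixOf (x :: t)) = false := by
              simp [List.isPrefixOf]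
              exact fun h => hx h.symm
            rw [hpre]
            simp only [Bool.false_eq_true, if_false]
            rw [ih f acc (by simpa using Nat.le_of_succ_le_succ hf)]
            rw [List.count_cons_of_ne hx]

lemma pv_count_singleton (cs : List Char) (c : Char) :
    PySem.Chars.count cs [c] = cs.count c := by
  simp only [PySem.Chars.count, List.isEmpty_cons, Bool.false_eq_true, if_false]
  simpa using pv_count_go_singleton c cs cs.length 0 le_rfl

-- everything after the dropWhile of a sorted-≤ run is strictly above the run's character
lemma pv_lt_of_mem_dropWhile (c : Char) :
    ∀ (t : List Char), t.Pairwise (· ≤ ·) → (∀ y ∈ t, c ≤ y) →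
      ∀ y ∈ t.dropWhile (fun x => x == c), c < y := by
  intro t
  induction t with
  | nil => intro _ _ y hy; simp at hy
  | cons x t' ih =>
      intro hp hc y hy
      by_cases hx : x = c
      · subst hx
        rw [List.dropWhile_cons_of_pos (by simp)] at hy
        exact ih hp.tail (fun z hz => hc z (by simp [hz])) y hy
      · rw [List.dropWhile_cons_of_neg (by simpa using hx)] at hy
        have hcx : c < x := lt_of_le_of_ne (hc x (by simp)) (fun h => hx h.symm)
        rcases List.mem_cons.mp hy with rfl | hy'
        · exact hcx
        · exact lt_of_lt_of_le hcx (List.rel_of_pairwise_cons hp hy')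

-- characterisation of B's run-length pass on a ≤-sorted list, against any strictly
-- increasing list d with the same members: pvRuns is d paired with the counts.
lemma pv_runs_eq (cs : List Char) (h : cs.Pairwise (· ≤ ·))
    (d : List Char) (hd : d.Pairwise (· < ·)) (hm : ∀ x, x ∈ d ↔ x ∈ cs) :
    pvRuns cs = d.map (fun x => (x, cs.count x)) := by
  induction cs using pvRuns.induct generalizing d with
  | case1 =>
      have : d = [] := by
        cases d with
        | nil => rfl
        | cons e d' => exact absurd ((hm e).mp (by simp)) (by simp)
      simp [this, pvRuns]
  | case2 c t ih =>
      -- d must be c :: d'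
      obtain ⟨e, d', rfl⟩ : ∃ e d', d = e :: d' := by
        cases d with
        | nil => exact absurd ((hm c).mpr (by simp)) (by simp)
        | cons e d' => exact ⟨e, d', rfl⟩
      have hce : e = c := by
        have h1 : c ≤ e := by
          rcases List.mem_cons.mp ((hm e).mp (by simp)) with h' | h'
          · exact le_of_eq h'.symm
          · exact List.rel_of_pairwise_cons h h'
        rcases List.mem_cons.mp ((hm c).mpr (by simp)) with h' | h'
        · exact h'.symm
        · exact absurd (List.rel_of_pairwise_cons hd h') (not_lt.mpr h1)
      subst hce
      set tw := t.takeWhile (fun x => x == e) with htw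
      set dw := t.dropWhile (fun x => x == e) with hdw
      have hsplit : tw ++ dw = t := List.takeWhile_append_dropWhile
      have htweq : ∀ y ∈ tw, y = e := by
        intro y hy
        have := List.mem_takeWhile_imp hy
        simpa using this
      have hdwp : dw.Pairwise (· ≤ ·) := List.Pairwise.sublist (List.dropWhile_sublist _) h.tail
      have hdwgt : ∀ y ∈ dw, e < y :=
        pv_lt_of_mem_dropWhile e t h.tail (fun y hy => List.rel_of_pairwise_cons h hy) 
      have hcount_e : (e :: t).count e = 1 + tw.length := by
        have h1 : tw.count e = tw.length := List.count_eq_length.mpr (fun b hb => (htweq b hb).symm)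
        have h2 : dw.count e = 0 := by
          rw [List.count_eq_zero]
          exact fun hmem => absurd (hdwgt e hmem) (lt_irrefl e)
        rw [List.count_cons_self, ← hsplit, List.count_append, h1, h2]
        omega
      have hmem' : ∀ x, x ∈ d' ↔ x ∈ dw := by
        intro x
        constructor
        · intro hx
          have hgt : e < x := List.rel_of_pairwise_cons hd hx
          have hxcs : x ∈ e :: t := (hm x).mp (by simp [hx])
          rcases List.mem_cons.mp hxcs with rfl | hxt
          · exact absurd hgt (lt_irrefl x)
          · rw [← hsplit] at hxt
            rcases List.mem_append.mp hxt with h' | h'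
            · exact absurd (htweq x h') (ne_of_gt hgt)
            · exact h'
        · intro hx
          have hgt : e < x := hdwgt x hx
          have : x ∈ e :: d' := (hm x).mpr (by
            simp only [List.mem_cons]
            right; rw [← hsplit]; exact List.mem_append.mpr (Or.inr hx))
          rcases List.mem_cons.mp this with rfl | h'
          · exact absurd hgt (lt_irrefl x)
          · exact h'
      have hrec : pvRuns dw = d'.map (fun x => (x, dw.count x)) := ih hdwp d' hd.tail hmem'
      have hcnt' : ∀ x ∈ d', (e :: t).count x = dw.count x := by
        intro x hx
        have hgt : e < x := List.rel_of_pairwise_cons hd hx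
        have hne : x ≠ e := ne_of_gt hgt
        have htwx : tw.count x = 0 := by
          rw [List.count_eq_zero]
          exact fun hmem => hne (htweq x hmem)
        rw [← hsplit]
        simp [List.count_append, htwx, Ne.symm hne]
      rw [pvRuns, List.map_cons, ← htw, ← hdw, hrec, hcount_e]
      congr 1
      exact (List.map_congr_left (fun x hx => by rw [hcnt' x hx])).symm

-- A's range-indexed comprehension over (new_set, char_count) is a plain map over new_set
lemma pv_range_map (xs : List Char) (g : Char → Int) (f : Char → Int → List Char) :
    (PySem.List.pyRange 0 (PySem.List.len xs) 1).map
      (fun i => f (PySem.List.pyGetD xs i ' ') (PySem.List.pyGetD (xs.map g) i 0)) =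
    xs.map (fun c => f c (g c)) := by
  apply List.ext_getElem
  · simp [PySem.List.length_pyRange_one, PySem.List.len_eq]
  · intro k h1 h2
    have hk : k < xs.length := by simpa using h2
    have hlen : k < (PySem.List.pyRange 0 (PySem.List.len xs) 1).length := by
      simpa [PySem.List.length_pyRange_one, PySem.List.len_eq] using hk
    have hr : (PySem.List.pyRange 0 (PySem.List.len xs) 1)[k]'hlen = (k : Int) := by
      rw [PySem.List.getElem_pyRange_one]; simp
    simp only [List.getElem_map, hr, PySem.List.pyGetD_natCast]
    rw [List.getD_eq_getElem _ _ hk, List.getD_eq_getElem _ _ (by simpa using hk)]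
    simp

-- per-word equality of the two formatted strings
lemma pv_word_eq (p : Int × String) :
    (let word := p.2
     let new_set := PySem.List.sorted (PySem.Set.ofList word.toList) (fun c => c) false
     let char_count := new_set.map (fun c => (PySem.Chars.count word.toList [c] : Int))
     let formatted :=
        PySem.Chars.join (", ".toList)
          ((PySem.List.pyRange 0 (PySem.List.len new_set) 1).map
            (fun i => [PySem.List.pyGetD new_set i ' '] ++ (": ".toList) ++
                      PySem.Int.toChars (PySem.List.pyGetD char_count i 0)))
     String.ofList (PySem.Int.toChars p.1 ++ (" - ".toList) ++ formatted)) =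
    (let parts := (pvRuns (PySem.List.sorted p.2.toList (fun c => c) false)).map
        (fun q => [q.1] ++ (": ".toList) ++ PySem.Int.toChars (q.2 : Int))
     String.ofList (PySem.Int.toChars p.1 ++ (" - ".toList) ++ PySem.Chars.join (", ".toList) parts)) := by
  simp only
  congr 2
  set w := p.2
  set s := PySem.List.sorted w.toList (fun c => c) false with hs
  set d := PySem.List.sorted (PySem.Set.ofList w.toList) (fun c => c) false with hd
  have hruns : pvRuns s = d.map (fun x => (x, s.count x)) := by
    apply pv_runs_eq
    · simpa using PySem.List.sorted_pairwise w.toList (fun c => c)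
    · exact PySem.List.sorted_ofList_pairwise_lt w.toList
    · intro x
      rw [hd, PySem.List.mem_sorted, PySem.Set.mem_ofList, hs, PySem.List.mem_sorted]
  have hcnt : ∀ c : Char, w.toList.count c = s.count c :=
    fun c => ((PySem.List.sorted_perm w.toList (fun c => c) false).count_eq c).symm
  rw [pv_range_map d (fun c => (PySem.Chars.count w.toList [c] : Int))
        (fun c n => [c] ++ (": ".toList) ++ PySem.Int.toChars n),
      hruns, List.map_map]
  refine congrArg _ (List.map_congr_left (fun c hc => ?_))
  simp only [Function.comp]
  rw [pv_count_singleton, hcnt c]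

-- ===== VERDICT (by name: the statement is the Claim_ definition above) =====
theorem analyze_words_spec : Claim_equal_analyze_words := by
  intro words _
  unfold Spec_analyze_words analyze_words analyze_words_alt
  rw [PySem.List.foldl_append_singleton_eq_map]
  simp only [List.nil_append]
  exact List.map_congr_left (fun p _ => pv_word_eq p)
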